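-- pv_equiv track=rewrite | github.com/sguccibnr32-creator/Public | forensic_anchors/full_recompute/full_recompute_tier1_runner.py | extract_numerics
-- ===== SOURCE A (Python) =====
-- def extract_numerics(stdout, patterns):
--     """Best-effort numerical extraction. Returns matched lines per pattern."""
--     matches = {}
--     lines = stdout.splitlines()
--     for p in patterns:
--         hits = [ln.strip() for ln in lines if p in ln]
--         if hits:
--             matches[p] = hits[:6]  # cap at 6 per pattern to keep manifest sane
--     return matches
-- ===== SOURCE B (Python) =====
-- def extract_numerics(stdout, patterns):
--     """One pass over the lines, capping each pattern's hit list at 6 as we go."""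
--     hits = {p: [] for p in patterns}
--     for ln in stdout.splitlines():
--         s = ln.strip()
--         for p in hits:
--             if len(hits[p]) < 6 and p in ln:
--                 hits[p].append(s)
--     return {p: h for p, h in hits.items() if h}
-- ===== Notes on version B (the rewrite author's own statement) =====
-- stated objective: alternative
-- what changed: A rescans all lines once per pattern and slices each hit list to 6 afterwards; B makes a single pass over the lines, appending the stripped line to each matching pattern's list only while it holds fewer than 6 entries, then keeps the non-empty lists.
import Mathlib
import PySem

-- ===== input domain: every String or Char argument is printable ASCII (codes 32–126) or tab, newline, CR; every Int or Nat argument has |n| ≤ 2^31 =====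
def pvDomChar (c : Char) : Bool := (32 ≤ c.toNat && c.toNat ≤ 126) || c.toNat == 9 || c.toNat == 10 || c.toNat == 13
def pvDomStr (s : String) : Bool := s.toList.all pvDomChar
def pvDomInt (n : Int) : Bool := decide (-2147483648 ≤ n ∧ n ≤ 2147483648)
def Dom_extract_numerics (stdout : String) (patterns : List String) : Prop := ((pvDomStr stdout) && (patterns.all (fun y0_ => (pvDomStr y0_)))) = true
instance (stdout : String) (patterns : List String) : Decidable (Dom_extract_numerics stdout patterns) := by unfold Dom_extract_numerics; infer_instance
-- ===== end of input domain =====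

-- B replaces A's per-pattern rescans of all lines by a single pass over the lines that
-- appends to each pattern's (6-capped) hit list; same return value, different decomposition.

-- ===== PORT A =====
def extract_numerics (stdout : String) (patterns : List String) : List (String × List String) :=
  let lines := PySem.Str.splitlines stdout
  let ms := patterns.foldl (fun (ms : PySem.Dict String (List String)) p =>
      let hits := (lines.filter (fun ln => PySem.Str.isIn p ln)).map PySem.Str.strip
      if hits ≠ [] then ms.insert p (PySem.List.slice hits none (some 6)) else ms)
    PySem.Dict.empty
  ms.items

-- ===== PORT B =====
def extract_numerics_alt (stdout : String) (patterns : List String) : List (String × List String) :=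
  let hits0 : PySem.Dict String (List String) := patterns.foldl (fun d p => d.insert p []) PySem.Dict.empty
  let hits := (PySem.Str.splitlines stdout).foldl (fun d ln =>
      let s := PySem.Str.strip ln
      d.keys.foldl (fun d' p =>
        if (d'.getD p []).length < 6 ∧ PySem.Str.isIn p ln then d'.insert p (d'.getD p [] ++ [s]) else d') d)
    hits0
  (hits.items.foldl (fun (m : PySem.Dict String (List String)) ph =>
      if ph.2 ≠ [] then m.insert ph.1 ph.2 else m) PySem.Dict.empty).items

-- ===== PRECONDITION & SPEC =====
def Spec_extract_numerics (stdout : String) (patterns : List String) (out : List (String × List String)) : Prop := out = extract_numerics_alt stdout patterns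
instance (stdout : String) (patterns : List String) (out : List (String × List String)) : Decidable (Spec_extract_numerics stdout patterns out) := by unfold Spec_extract_numerics; infer_instance

-- ===== CLAIM (what is proved, stated in full; the proofs are below) =====
def Claim_equal_extract_numerics : Prop := ∀ (stdout : String) (patterns : List String), Dom_extract_numerics stdout patterns → Spec_extract_numerics stdout patterns (extract_numerics stdout patterns)

-- ===== LEMMAS AND PROOFS =====

-- stripped lines containing p (the uncapped hit list of pattern p)
def pvHits (L : List String) (p : String) : List String :=
  (L.filter (fun ln => PySem.Str.isIn p ln)).map PySem.Str.strip

-- overwrite-insert on a dict whose items are K.map (q, w q), at a key p ∈ K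
lemma pv_insert_items (d : PySem.Dict String (List String)) (K : List String)
    (w : String → List String) (p : String) (v : List String)
    (h : d.items = K.map (fun q => (q, w q))) (hp : p ∈ K) :
    (d.insert p v).items = K.map (fun q => (q, if q = p then v else w q)) := by
  have hc : d.contains p = true := by
    rw [PySem.Dict.contains_eq_decide_mem_keys]
    simp [PySem.Dict.keys, h, hp]
  rw [PySem.Dict.items_insert_of_contains d v hc, h, List.map_map]
  refine List.map_congr_left (fun q _ => ?_)
  by_cases hqp : q = p <;> simp [hqp]

lemma pv_keys_eq (d : PySem.Dict String (List String)) (K : List String)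
    (w : String → List String) (h : d.items = K.map (fun q => (q, w q))) :
    d.keys = K := by
  show d.items.map Prod.fst = K
  simp [h, Function.comp_def]

lemma pv_update_cons (S : List String) (p : String) (ps : List String) :
    PySem.Set.update S (p::ps) = PySem.Set.update (PySem.Set.add S p) ps := rfl

-- the {p: [] for p in patterns} initialisation
lemma pv_init_fold (ps : List String) : ∀ (S : List String) (m : PySem.Dict String (List String)),
    S.Nodup → m.items = S.map (fun q => (q, ([] : List String))) →
    (ps.foldl (fun d p => d.insert p []) m).items
      = (PySem.Set.update S ps).map (fun q => (q, ([] : List String))) := by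
  induction ps with
  | nil => intro S m _ hm; simpa using hm
  | cons p ps ih =>
    intro S m hS hm
    rw [pv_update_cons, List.foldl_cons]
    by_cases hp : p ∈ S
    · have hadd : PySem.Set.add S p = S := by
        simp [PySem.Set.add, PySem.Set.contains_eq_listContains, hp]
      rw [hadd]
      refine ih S _ hS ?_
      rw [pv_insert_items m S _ p [] hm hp]
      exact List.map_congr_left (fun q _ => by by_cases hqp : q = p <;> simp [hqp])
    · have hadd : PySem.Set.add S p = S ++ [p] := by
        simp [PySem.Set.add, PySem.Set.contains_eq_listContains, hp]
      rw [hadd]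
      have hc : m.contains p = false := by
        rw [PySem.Dict.contains_eq_decide_mem_keys, pv_keys_eq m S _ hm]
        simp [hp]
      refine ih (S ++ [p]) _ (by simp [List.nodup_append, hS]; exact fun a ha h => hp (h ▸ ha)) ?_
      rw [PySem.Dict.items_insert_of_not_contains m [] hc, hm]
      simp

-- A's loop over patterns, with accumulator characterised by the set S of patterns seen so far
lemma pv_A_fold (L : List String) (ps : List String) :
    ∀ (S : List String) (m : PySem.Dict String (List String)), S.Nodup →
    m.items = ((S.filter (fun p => decide (pvHits L p ≠ []))).map
                 (fun q => (q, (pvHits L q).take 6))) →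
    (ps.foldl (fun (m : PySem.Dict String (List String)) p =>
        let hits := (L.filter (fun ln => PySem.Str.isIn p ln)).map PySem.Str.strip
        if hits ≠ [] then m.insert p (PySem.List.slice hits none (some 6)) else m) m).items
      = (((PySem.Set.update S ps).filter (fun p => decide (pvHits L p ≠ []))).map
           (fun q => (q, (pvHits L q).take 6))) := by
  induction ps with
  | nil => intro S m _ hm; simpa using hm
  | cons p ps ih =>
    intro S m hS hm
    rw [pv_update_cons, List.foldl_cons]
    by_cases hne : (L.filter (fun ln => PySem.Str.isIn p ln)).map PySem.Str.strip ≠ []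
    · have hslice : PySem.List.slice ((L.filter (fun ln => PySem.Str.isIn p ln)).map PySem.Str.strip) none (some 6)
          = (pvHits L p).take 6 := by
        rw [PySem.List.slice_to _ (by omega : (0:Int) ≤ 6)]; rfl
      simp only [if_pos hne, hslice]
      by_cases hp : p ∈ S
      · have hadd : PySem.Set.add S p = S := by
          simp [PySem.Set.add, PySem.Set.contains_eq_listContains, hp]
        rw [hadd]
        refine ih S _ hS ?_
        have hpf : p ∈ S.filter (fun p => decide (pvHits L p ≠ [])) := by
          simp [List.mem_filter, hp]; exact hne
        rw [pv_insert_items m _ _ p _ hm hpf]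
        exact List.map_congr_left (fun q hq => by by_cases hqp : q = p <;> simp [hqp])
      · have hadd : PySem.Set.add S p = S ++ [p] := by
          simp [PySem.Set.add, PySem.Set.contains_eq_listContains, hp]
        rw [hadd]
        have hc : m.contains p = false := by
          rw [PySem.Dict.contains_eq_decide_mem_keys, pv_keys_eq m _ _ hm]
          simp [List.mem_filter, hp]
        refine ih (S ++ [p]) _ (by simp [List.nodup_append, hS]; exact fun a ha h => hp (h ▸ ha)) ?_
        rw [PySem.Dict.items_insert_of_not_contains m _ hc, hm]
        have hb : pvHits L p ≠ [] := hne
        simp [List.filter_append, hb]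
    · simp only [if_neg hne]
      have hnil : pvHits L p = [] := not_not.mp hne
      have hfil : ∀ T : List String, (T ++ [p]).filter (fun q => decide (pvHits L q ≠ []))
          = T.filter (fun q => decide (pvHits L q ≠ [])) := by
        intro T; simp [List.filter_append, hnil]
      by_cases hp : p ∈ S
      · have hadd : PySem.Set.add S p = S := by
          simp [PySem.Set.add, PySem.Set.contains_eq_listContains, hp]
        rw [hadd]; exact ih S m hS hm
      · have hadd : PySem.Set.add S p = S ++ [p] := by
          simp [PySem.Set.add, PySem.Set.contains_eq_listContains, hp]
        rw [hadd]
        refine ih (S ++ [p]) m (by simp [List.nodup_append, hS]; exact fun a ha h => hp (h ▸ ha)) ?_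
        rw [hfil]; exact hm

-- one line of B's pass: the inner loop over the (pairwise distinct) keys ks updates each
-- key's value independently
lemma pv_inner_fold (ln s : String) (ks : List String) :
    ∀ (K : List String) (w : String → List String) (d : PySem.Dict String (List String)),
    K.Nodup → ks.Nodup → (∀ p ∈ ks, p ∈ K) → d.items = K.map (fun q => (q, w q)) →
    (ks.foldl (fun d' p =>
        if (d'.getD p []).length < 6 ∧ PySem.Str.isIn p ln then d'.insert p (d'.getD p [] ++ [s]) else d') d).items
      = K.map (fun q => (q, if q ∈ ks then
            (if (w q).length < 6 ∧ PySem.Str.isIn q ln = true then w q ++ [s] else w q) else w q)) := by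
  induction ks with
  | nil => intro K w d _ _ _ hd; simpa using hd
  | cons p ks ih =>
    intro K w d hK hks hsub hd
    have hpK : p ∈ K := hsub p (List.mem_cons_self ..)
    have hget : d.getD p [] = w p := by
      rw [PySem.Dict.getD_eq_get?_getD,
        PySem.Dict.get?_of_mem_items d (by rw [hd]; exact List.mem_map_of_mem hpK)
          (by rw [pv_keys_eq d K w hd]; exact hK)]
      rfl
    have hks' : ks.Nodup := hks.of_cons
    have hpks : p ∉ ks := (List.nodup_cons.mp hks).1
    show (ks.foldl _ (if (d.getD p []).length < 6 ∧ PySem.Str.isIn p ln then _ else d)).items = _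
    rw [hget]
    by_cases hc : (w p).length < 6 ∧ PySem.Str.isIn p ln = true
    · rw [if_pos hc]
      have hd' := pv_insert_items d K w p (w p ++ [s]) hd hpK
      rw [ih K (fun q => if q = p then w p ++ [s] else w q) _ hK hks'
        (fun q hq => hsub q (List.mem_cons_of_mem _ hq)) hd']
      refine List.map_congr_left (fun q _ => ?_)
      by_cases hqp : q = p
      · subst hqp
        rw [if_neg hpks, if_pos (List.mem_cons_self ..), if_pos hc, if_pos rfl]
      · by_cases hqks : q ∈ ks <;> simp [hqp, hqks]
    · rw [if_neg hc]
      rw [ih K w d hK hks' (fun q hq => hsub q (List.mem_cons_of_mem _ hq)) hd]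
      refine List.map_congr_left (fun q _ => ?_)
      by_cases hqp : q = p
      · subst hqp
        rw [if_neg hpks, if_pos (List.mem_cons_self ..), if_neg hc]
      · by_cases hqks : q ∈ ks <;> simp [hqp, hqks]

-- B's pass over the lines, value-functionally
lemma pv_line_fold (ls : List String) :
    ∀ (K : List String) (w : String → List String) (d : PySem.Dict String (List String)),
    K.Nodup → d.items = K.map (fun q => (q, w q)) →
    (ls.foldl (fun d ln =>
        d.keys.foldl (fun d' p =>
          if (d'.getD p []).length < 6 ∧ PySem.Str.isIn p ln then d'.insert p (d'.getD p [] ++ [PySem.Str.strip ln]) else d') d) d).items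
      = K.map (fun q => (q, ls.foldl (fun acc ln =>
          if acc.length < 6 ∧ PySem.Str.isIn q ln = true then acc ++ [PySem.Str.strip ln] else acc) (w q))) := by
  induction ls with
  | nil => intro K w d _ hd; simpa using hd
  | cons ln ls ih =>
    intro K w d hK hd
    have hkeys : d.keys = K := pv_keys_eq d K w hd
    show (ls.foldl _ (d.keys.foldl _ d)).items = _
    have hstep := pv_inner_fold ln (PySem.Str.strip ln) d.keys K w d hK
      (by rw [hkeys]; exact hK) (by rw [hkeys]; exact fun p hp => hp) hd
    rw [ih K _ _ hK hstep]
    refine List.map_congr_left (fun q hq => ?_)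
    simp [hkeys, hq]

-- the per-key scalar loop computes the 6-capped hit list
lemma pv_scalar (q : String) (ls : List String) :
    ∀ (A : List String),
    ls.foldl (fun acc ln =>
        if acc.length < 6 ∧ PySem.Str.isIn q ln = true then acc ++ [PySem.Str.strip ln] else acc) (A.take 6)
      = (A ++ (ls.filter (fun ln => PySem.Str.isIn q ln)).map PySem.Str.strip).take 6 := by
  induction ls with
  | nil => intro A; simp
  | cons ln ls ih =>
    intro A
    by_cases hin : PySem.Str.isIn q ln = true
    · by_cases hl : A.length < 6
      · have htk : A.take 6 = A := List.take_of_length_le (by omega)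
        have htk2 : A ++ [PySem.Str.strip ln] = (A ++ [PySem.Str.strip ln]).take 6 := by
          rw [List.take_of_length_le (by simp; omega)]
        have hin' : PySem.Chars.isIn q.toList ln.toList = true := hin
        simp only [List.foldl_cons, htk, hin, and_true, if_pos hl]
        rw [htk2, ih (A ++ [PySem.Str.strip ln])]
        simp [hin']
      · have hlen : (A.take 6).length = 6 := by simp; omega
        have hcond : ¬ ((A.take 6).length < 6 ∧ PySem.Str.isIn q ln = true) := by
          intro h; omega
        have hx : ∀ B : List String, (A ++ B).take 6 = A.take 6 := fun B =>
          List.take_append_of_le_length (by omega)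
        simp only [List.foldl_cons, if_neg hcond]
        rw [ih A, hx, hx]
    · have hinf : PySem.Str.isIn q ln = false := by rwa [Bool.not_eq_true] at hin
      have hinf' : PySem.Chars.isIn q.toList ln.toList = false := hinf
      simp only [List.foldl_cons]
      rw [if_neg (by simp [hinf'])]
      rw [ih A]
      simp [hinf']

-- B's final filtering pass over the items of a nodup-keyed dict
lemma pv_final_fold (K : List String) :
    ∀ (V : String → List String) (m : PySem.Dict String (List String)),
    K.Nodup → (∀ p ∈ K, m.contains p = false) →
    ((K.map (fun q => (q, V q))).foldl (fun (m : PySem.Dict String (List String)) ph =>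
        if ph.2 ≠ [] then m.insert ph.1 ph.2 else m) m).items
      = m.items ++ (K.filter (fun q => decide (V q ≠ []))).map (fun q => (q, V q)) := by
  induction K with
  | nil => intro V m _ _; simp
  | cons p K ih =>
    intro V m hK hc
    have hpK : p ∉ K := (List.nodup_cons.mp hK).1
    by_cases hv : V p ≠ []
    · simp only [List.map_cons, List.foldl_cons, if_pos hv]
      rw [ih V _ hK.of_cons (fun q hq => by
        rw [PySem.Dict.contains_insert]
        have : (q == p) = false := by simp; exact fun h => hpK (h ▸ hq)
        rw [this, hc q (List.mem_cons_of_mem _ hq)]; rfl)]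
      rw [PySem.Dict.items_insert_of_not_contains m _ (hc p (List.mem_cons_self ..))]
      simp [hv]
    · simp only [List.map_cons, List.foldl_cons, if_neg hv]
      rw [ih V m hK.of_cons (fun q hq => hc q (List.mem_cons_of_mem _ hq))]
      simp [hv]

-- ===== VERDICT (by name: the statement is the Claim_ definition above) =====
theorem extract_numerics_spec : Claim_equal_extract_numerics := by
  intro stdout patterns _
  unfold Spec_extract_numerics extract_numerics extract_numerics_alt
  set L := PySem.Str.splitlines stdout with hL
  set K := PySem.Set.ofList patterns with hKdef
  have hKnodup : K.Nodup := PySem.Set.nodup_ofList patterns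
  -- A's side
  have hA := pv_A_fold L patterns [] PySem.Dict.empty (by simp) rfl
  rw [PySem.Set.update_nil_left] at hA
  -- B's side
  have h0 : (patterns.foldl (fun d p => d.insert p ([] : List String)) PySem.Dict.empty).items
      = K.map (fun q => (q, ([] : List String))) := by
    have := pv_init_fold patterns [] PySem.Dict.empty (by simp) rfl
    rwa [PySem.Set.update_nil_left] at this
  have h1 := pv_line_fold L K (fun _ => ([] : List String)) _ hKnodup h0
  have h2 : ∀ q, L.foldl (fun acc ln =>
        if acc.length < 6 ∧ PySem.Str.isIn q ln = true then acc ++ [PySem.Str.strip ln] else acc)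
        ([] : List String) = (pvHits L q).take 6 := by
    intro q
    have := pv_scalar q L []
    simpa [pvHits] using this
  have h1' : (L.foldl (fun d ln =>
        d.keys.foldl (fun d' p =>
          if (d'.getD p []).length < 6 ∧ PySem.Str.isIn p ln then d'.insert p (d'.getD p [] ++ [PySem.Str.strip ln]) else d') d)
        (patterns.foldl (fun d p => d.insert p ([] : List String)) PySem.Dict.empty)).items
      = K.map (fun q => (q, (pvHits L q).take 6)) := by
    rw [h1]
    exact List.map_congr_left (fun q _ => by rw [h2 q])
  rw [hA]
  dsimp only
  rw [h1']
  rw [pv_final_fold K (fun q => (pvHits L q).take 6) PySem.Dict.empty hKnodup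
    (fun p _ => by simp [PySem.Dict.contains_empty])]
  have hfe : K.filter (fun q => decide ((pvHits L q).take 6 ≠ []))
      = K.filter (fun q => decide (pvHits L q ≠ [])) := by
    refine List.filter_congr (fun q _ => ?_)
    simp [List.take_eq_nil_iff]
  have hemp : (PySem.Dict.empty : PySem.Dict String (List String)).items = [] := rfl
  rw [hemp, List.nil_append, hfe]
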